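-- pv_equiv track=rewrite | github.com/traffaillac/Advent-of-Code-2020 | day20.py | roughness
-- ===== SOURCE A (Python) =====
-- def roughness(pic):
-- 	waves = {(r,c) for r in range(len(pic)) for c in range(len(pic[0])) if pic[r][c]=='#'}
-- 	for r in range(len(pic)-2):
-- 		for c in range(len(pic[r])-19):
-- 			monster = {(r+y,c+x) for x,y in ((0,1),(1,2),(4,2),(5,1),(6,1),(7,2),(10,2),(11,1),(12,1),(13,2),(16,2),(17,1),(18,0),(18,1),(19,1)) if pic[r+y][c+x]=='#'}
-- 			if len(monster)==15:
-- 				waves -= monster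
-- 	return len(waves)
-- ===== SOURCE B (Python) =====
-- MONSTER = ((0,1),(1,2),(4,2),(5,1),(6,1),(7,2),(10,2),(11,1),(12,1),(13,2),(16,2),(17,1),(18,0),(18,1),(19,1))
--
-- def _full(pic, a, b):
-- 	return all(pic[a+y][b+x] == '#' for x, y in MONSTER)
--
-- def _covered(pic, r, c):
-- 	# is cell (r,c) part of some fully matched monster? try the 15 candidate anchors
-- 	return any(y <= r and x <= c and r-y < len(pic)-2 and c-x < len(pic[r-y])-19
-- 	           and _full(pic, r-y, c-x) for x, y in MONSTER)
--
-- def roughness(pic):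
-- 	W = len(pic[0]) if pic else 0
-- 	n = 0
-- 	for r in range(len(pic)):
-- 		for c in range(W):
-- 			if pic[r][c] == '#' and not _covered(pic, r, c):
-- 				n += 1
-- 	return n
-- ===== Notes on version B (the rewrite author's own statement) =====
-- stated objective: alternative
-- what changed: A is anchor-centric: it builds a wave set and destructively subtracts the cells of every matched monster; B is cell-centric: no set at all, it counts each '#' cell directly, deciding per cell whether any of its 15 candidate anchor positions hosts a fully matched monster.
import Mathlib
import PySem

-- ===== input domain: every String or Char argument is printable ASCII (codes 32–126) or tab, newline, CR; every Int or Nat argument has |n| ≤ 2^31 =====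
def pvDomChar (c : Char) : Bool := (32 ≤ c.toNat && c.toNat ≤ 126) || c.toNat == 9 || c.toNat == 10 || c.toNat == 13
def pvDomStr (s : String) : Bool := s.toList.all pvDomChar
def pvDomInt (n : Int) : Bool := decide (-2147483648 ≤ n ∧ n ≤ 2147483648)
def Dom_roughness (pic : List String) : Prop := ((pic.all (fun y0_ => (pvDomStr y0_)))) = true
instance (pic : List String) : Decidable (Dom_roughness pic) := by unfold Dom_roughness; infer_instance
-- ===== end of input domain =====

-- B replaces A's anchor-centric mutable wave set with a cell-centric count: each '#' cell is kept
-- iff none of its 15 candidate anchors hosts a full monster (objective: alternative algorithm).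

-- ===== PORT A =====
-- the 15 (x, y) sea-monster offsets, shared literal of both programs
def pvMonster : List (Nat × Nat) :=
  [(0,1),(1,2),(4,2),(5,1),(6,1),(7,2),(10,2),(11,1),(12,1),(13,2),(16,2),(17,1),(18,0),(18,1),(19,1)]

-- pic[r][c] == '#'; every index either program reaches while returning normally is in range
-- (out-of-range is excluded by Pre_), so the total getD form is exact there
def pvHash (pic : List String) (r c : Nat) : Bool :=
  ((pic.getD r "").toList.getD c ' ') == '#'

-- the absolute cells {(r+y, c+x)} of a monster anchored at (r, c)
def pvCells (r c : Nat) : List (Nat × Nat) :=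
  pvMonster.map (fun p => (r + p.2, c + p.1))

-- A's initial set comprehension: all (r, c) with pic[r][c] == '#' (elements pairwise distinct by construction)
def pvWaves (pic : List String) : List (Nat × Nat) :=
  (List.range pic.length).flatMap (fun r =>
    ((List.range (pic.headD "").toList.length).filter (fun c => pvHash pic r c)).map (fun c => (r, c)))

def roughness (pic : List String) : Int :=
  (((List.range (pic.length - 2)).foldl (fun waves r =>
      (List.range ((pic.getD r "").toList.length - 19)).foldl (fun waves c =>
        let monster := (pvCells r c).filter (fun q => pvHash pic q.1 q.2)
        if monster.length == 15 then waves.filter (fun q => !(monster.contains q)) else waves)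
        waves)
      (pvWaves pic)).length : Int)

-- ===== PORT B =====
-- Source B's _full: the monster anchored at (a, b) is fully present
def pvFull (pic : List String) (a b : Nat) : Bool :=
  (pvCells a b).all (fun q => pvHash pic q.1 q.2)

-- Source B's _covered: cell (r, c) belongs to some fully matched monster; the Python int guards
-- 'y <= r and x <= c and r-y < len(pic)-2 and c-x < len(pic[r-y])-19' are exact in Nat arithmetic
-- because truncated subtraction only occurs after the ≤ guards hold, and a negative Python bound
-- (len-2 or len-19 below 0) makes the < guard false exactly as the Nat form does
def pvCoveredB (pic : List String) (r c : Nat) : Bool :=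
  pvMonster.any (fun p =>
    decide (p.2 ≤ r) && decide (p.1 ≤ c) && decide (r - p.2 < pic.length - 2) &&
    decide (c - p.1 < (pic.getD (r - p.2) "").toList.length - 19) &&
    pvFull pic (r - p.2) (c - p.1))

def roughness_alt (pic : List String) : Int :=
  (List.range pic.length).foldl (fun n r =>
    (List.range (pic.headD "").toList.length).foldl (fun n c =>
      if pvHash pic r c && !pvCoveredB pic r c then n + 1 else n) n) (0 : Int)

-- ===== PRECONDITION & SPEC =====
-- Pre_ is exactly where Python A returns normally: A raises IndexError when some row is shorter than
-- row 0 (its first comprehension indexes every row up to row 0's width), or when the monster scan of a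
-- row of width ≥ 20 reaches past the end of one of the two rows below it.
def Pre_roughness (pic : List String) : Prop :=
  (∀ s ∈ pic, (pic.headD "").toList.length ≤ s.toList.length) ∧
  (∀ r < pic.length - 2, 20 ≤ (pic.getD r "").toList.length →
    (pic.getD r "").toList.length ≤ (pic.getD (r+1) "").toList.length ∧
    (pic.getD r "").toList.length - 3 ≤ (pic.getD (r+2) "").toList.length)
instance (pic : List String) : Decidable (Pre_roughness pic) := by unfold Pre_roughness; infer_instance

def pvWitness_roughness : List String := ["#.", ".#", "##"]

def Spec_roughness (pic : List String) (out : Int) : Prop := out = roughness_alt pic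
instance (pic : List String) (out : Int) : Decidable (Spec_roughness pic out) := by unfold Spec_roughness; infer_instance

-- ===== CLAIM (what is proved, stated in full; the proofs are below) =====
def Claim_equal_roughness : Prop := ∀ (pic : List String), Dom_roughness pic → Pre_roughness pic → Spec_roughness pic (roughness pic)

-- ===== LEMMAS AND PROOFS =====

-- folding successive filters = one filter by the conjunction over the control list
theorem pvFoldlFilter {α β : Type} (g : α → β → Bool) :
    ∀ (L : List α) (w : List β),
      L.foldl (fun w a => w.filter (g a)) w = w.filter (fun q => L.all (fun a => g a q)) := by
  intro L
  induction L with
  | nil => intro w; simp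
  | cons a t ih =>
    intro w
    simp only [List.foldl_cons, ih, List.filter_filter, List.all_cons]
    apply List.filter_congr
    intro q _
    simp [Bool.and_comm]

-- A's loop body is a filter by "not covered by a full monster anchored at (r, c)"
theorem pvStepA (pic : List String) (r c : Nat) (waves : List (Nat × Nat)) :
    (let monster := (pvCells r c).filter (fun q => pvHash pic q.1 q.2)
     if monster.length == 15 then waves.filter (fun q => !(monster.contains q)) else waves)
    = waves.filter (fun q => !(pvFull pic r c && (pvCells r c).contains q)) := by
  have hlen15 : (pvCells r c).length = 15 := by simp [pvCells, pvMonster]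
  by_cases hall : ∀ q ∈ pvCells r c, pvHash pic q.1 q.2 = true
  · have hfil : (pvCells r c).filter (fun q => pvHash pic q.1 q.2) = pvCells r c :=
      List.filter_eq_self.mpr hall
    have hF : pvFull pic r c = true := List.all_eq_true.mpr hall
    simp [hfil, hlen15, hF]
  · have hF : pvFull pic r c = false := by
      rw [← Bool.not_eq_true, pvFull, List.all_eq_true]; exact hall
    have hne : (((pvCells r c).filter (fun q => pvHash pic q.1 q.2)).length == 15) = false := by
      apply beq_false_of_ne
      intro hEq
      exact hall (List.length_filter_eq_length_iff.mp (by rw [hEq, hlen15]))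
    simp [hne, hF]

-- the two cell predicates coincide: "no scanned anchor's full monster contains q" = "not covered"
theorem pvPredEq (pic : List String) (r c : Nat) :
    ((List.range (pic.length - 2)).all (fun a =>
      (List.range ((pic.getD a "").toList.length - 19)).all (fun b =>
        !(pvFull pic a b && (pvCells a b).contains (r, c)))))
    = !pvCoveredB pic r c := by
  rw [Bool.eq_iff_iff]
  constructor
  · intro hall
    rw [Bool.not_eq_true', pvCoveredB, List.any_eq_false]
    intro p hp
    by_contra hpred
    simp only [Bool.and_eq_true, decide_eq_true_eq] at hpred
    obtain ⟨⟨⟨⟨h1, h2⟩, h3⟩, h4⟩, h5⟩ := hpred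
    have ha := List.all_eq_true.mp hall (r - p.2) (List.mem_range.mpr h3)
    have hb := List.all_eq_true.mp ha (c - p.1) (List.mem_range.mpr h4)
    rw [Bool.not_eq_true', Bool.and_eq_false_iff] at hb
    rcases hb with hb | hb
    · rw [h5] at hb; exact absurd hb (by decide)
    · have hmem : (r, c) ∈ pvCells (r - p.2) (c - p.1) := by
        rw [pvCells, List.mem_map]
        refine ⟨p, hp, ?_⟩
        rw [Prod.mk.injEq]
        omega
      rw [← List.contains_iff_mem] at hmem
      rw [hmem] at hb
      exact absurd hb (by decide)
  · intro hncov
    rw [Bool.not_eq_true'] at hncov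
    apply List.all_eq_true.mpr
    intro a ha
    apply List.all_eq_true.mpr
    intro b hb
    rw [List.mem_range] at ha hb
    rw [Bool.not_eq_true', Bool.and_eq_false_iff]
    by_cases hF : pvFull pic a b = true
    · right
      by_contra hc
      rw [Bool.not_eq_false, List.contains_iff_mem, pvCells, List.mem_map] at hc
      obtain ⟨p, hp, heq⟩ := hc
      have h1 : a + p.2 = r := congrArg Prod.fst heq
      have h2 : b + p.1 = c := congrArg Prod.snd heq
      have hcov : pvCoveredB pic r c = true := by
        rw [pvCoveredB, List.any_eq_true]
        refine ⟨p, hp, ?_⟩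
        have ha' : r - p.2 = a := by omega
        have hb' : c - p.1 = b := by omega
        simp only [Bool.and_eq_true, decide_eq_true_eq]
        exact ⟨⟨⟨⟨by omega, by omega⟩, by omega⟩, by rw [ha', hb']; exact hb⟩,
          by rw [ha', hb']; exact hF⟩
      rw [hcov] at hncov
      exact absurd hncov (by decide)
    · left
      exact Bool.not_eq_true _ ▸ hF

theorem roughness_eq_alt (pic : List String) : roughness pic = roughness_alt pic := by
  unfold roughness roughness_alt
  rw [show (fun (waves : List (Nat × Nat)) (r : Nat) =>
        (List.range ((pic.getD r "").toList.length - 19)).foldl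
          (fun waves c =>
            let monster := (pvCells r c).filter (fun q => pvHash pic q.1 q.2)
            if monster.length == 15 then waves.filter (fun q => !(monster.contains q)) else waves)
          waves)
      = fun waves r => waves.filter (fun q =>
          (List.range ((pic.getD r "").toList.length - 19)).all
            (fun b => !(pvFull pic r b && (pvCells r b).contains q)))
      from funext₂ (fun waves r => by
        rw [show (fun (w : List (Nat × Nat)) (c : Nat) =>
              let monster := (pvCells r c).filter (fun q => pvHash pic q.1 q.2)
              if monster.length == 15 then w.filter (fun q => !(monster.contains q)) else w)
            = fun w c => w.filter (fun q => !(pvFull pic r c && (pvCells r c).contains q))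
            from funext₂ (fun w c => pvStepA pic r c w)]
        exact pvFoldlFilter _ _ _)]
  rw [pvFoldlFilter]
  rw [show (fun (n : Int) (r : Nat) =>
        (List.range (pic.headD "").toList.length).foldl
          (fun n c => if pvHash pic r c && !pvCoveredB pic r c then n + 1 else n) n)
      = fun n r => n + (((List.range (pic.headD "").toList.length).countP
          (fun c => pvHash pic r c && !pvCoveredB pic r c) : Nat) : Int)
      from funext₂ (fun n r => PySem.List.foldl_if_add_one _ _ _)]
  rw [PySem.List.foldl_add]
  rw [zero_add, pvWaves, List.filter_flatMap, List.length_flatMap, Nat.cast_list_sum,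
    List.map_map]
  congr 1
  apply List.map_congr_left
  intro r _
  simp only [Function.comp_apply]
  rw [← List.countP_eq_length_filter, List.countP_map, List.countP_filter]
  congr 1
  apply List.countP_congr
  intro c _
  simp only [Function.comp_apply]
  rw [pvPredEq pic r c, Bool.and_comm]

-- ===== VERDICT (by name: the statement is the Claim_ definition above) =====
theorem roughness_spec : Claim_equal_roughness := by
  intro pic _ _
  exact roughness_eq_alt pic
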